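-- pv_equiv track=rewrite | github.com/sidhesh-tavare/Daily-Coding | LC contest/BWC181_2.py | compareBitonicSums
-- ===== SOURCE A (Python) =====
-- def compareBitonicSums(nums: list[int]) -> int:
--     n = len(nums)
--     if n==0 : return -1
--     asc,desc,peak=0,0,False
--     for i in range(n):
--         if not peak:
--             asc+=nums[i]
--             if i+1<n and nums[i]>nums[i+1]:
--                 peak = True
--                 desc=nums[i]
--             elif i==n-1:
--                 desc=nums[i]
--         else:
--             desc+=nums[i]
--
--     if asc>desc: return 0
--     elif desc>asc: return 1
--     else: return -1
-- ===== SOURCE B (Python) =====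
-- def compareBitonicSums(nums: list[int]) -> int:
--     if not nums:
--         return -1
--     total = sum(nums)
--     run = 0
--     peak = nums[-1]
--     for x, y in zip(nums, nums[1:]):
--         run += x
--         if x > y:
--             peak = x
--             break
--     else:
--         run += nums[-1]
--     d = 2 * run - total - peak
--     return 0 if d > 0 else (1 if d < 0 else -1)
-- ===== Notes on version B (the rewrite author's own statement) =====
-- stated objective: alternative
-- what changed: B never computes a descending sum at all: it takes the whole-array total once (C-speed sum), scans adjacent pairs via zip accumulating only the running prefix sum until the first descent, and decides by the sign of the single expression 2*run - total - peak, instead of A's per-index stateful loop maintaining separate asc/desc accumulators and a peak flag.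
import Mathlib
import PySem

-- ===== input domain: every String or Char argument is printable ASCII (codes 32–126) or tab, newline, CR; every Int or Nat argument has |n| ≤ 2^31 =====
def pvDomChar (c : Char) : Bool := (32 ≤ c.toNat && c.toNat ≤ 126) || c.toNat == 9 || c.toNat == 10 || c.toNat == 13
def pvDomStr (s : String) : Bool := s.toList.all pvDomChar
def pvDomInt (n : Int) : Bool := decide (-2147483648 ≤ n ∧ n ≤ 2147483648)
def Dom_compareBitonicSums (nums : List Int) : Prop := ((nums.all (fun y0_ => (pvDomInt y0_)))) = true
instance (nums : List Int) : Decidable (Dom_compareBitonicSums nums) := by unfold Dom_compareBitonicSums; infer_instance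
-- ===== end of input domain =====

-- B avoids A's separate asc/desc accumulators and peak flag: one whole-array total,
-- a pairwise zip scan for the running prefix sum, and the sign of 2*run - total - peak.

-- ===== PORT A =====
-- loop body of A's 'for i in range(n)' (state = (asc, desc, peak))
def pvStepA (nums : List Int) (n : Int) (st : Int × Int × Bool) (i : Int) : Int × Int × Bool :=
  if !st.2.2 then
    let asc := st.1 + PySem.List.pyGetD nums i 0
    if i + 1 < n ∧ PySem.List.pyGetD nums i 0 > PySem.List.pyGetD nums (i + 1) 0 then
      (asc, PySem.List.pyGetD nums i 0, true)
    else if i = n - 1 then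
      (asc, PySem.List.pyGetD nums i 0, st.2.2)
    else
      (asc, st.2.1, st.2.2)
  else
    (st.1, st.2.1 + PySem.List.pyGetD nums i 0, st.2.2)

def compareBitonicSums (nums : List Int) : Int :=
  let n : Int := PySem.List.len nums
  if n = 0 then -1
  else
    let st := (PySem.List.pyRange 0 n 1).foldl (pvStepA nums n) (0, 0, false)
    if st.1 > st.2.1 then 0
    else if st.2.1 > st.1 then 1
    else -1

-- ===== PORT B =====
-- B's 'for x, y in zip(nums, nums[1:]): run += x; if x > y: peak = x; break'
-- (result: final run, and 'some peak' iff the loop broke)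
def pvLoopB : List (Int × Int) → Int → Int × Option Int
  | [], run => (run, none)
  | (x, y) :: rest, run =>
      if x > y then (run + x, some x) else pvLoopB rest (run + x)

def compareBitonicSums_alt (nums : List Int) : Int :=
  if nums = [] then -1
  else
    let total := nums.sum
    let r := pvLoopB (nums.zip (PySem.List.slice nums (some 1) none)) 0
    -- for-else: no break ⇒ run += nums[-1], peak stays nums[-1]
    let run := match r.2 with | some _ => r.1 | none => r.1 + PySem.List.pyGetD nums (-1) 0
    let peak := match r.2 with | some pk => pk | none => PySem.List.pyGetD nums (-1) 0
    let d := 2 * run - total - peak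
    if d > 0 then 0 else if d < 0 then 1 else -1

-- ===== PRECONDITION & SPEC =====
def Spec_compareBitonicSums (nums : List Int) (out : Int) : Prop := out = compareBitonicSums_alt nums
instance (nums : List Int) (out : Int) : Decidable (Spec_compareBitonicSums nums out) := by unfold Spec_compareBitonicSums; infer_instance

-- ===== CLAIM (what is proved, stated in full; the proofs are below) =====
def Claim_equal_compareBitonicSums : Prop := ∀ (nums : List Int), Dom_compareBitonicSums nums → Spec_compareBitonicSums nums (compareBitonicSums nums)

-- ===== LEMMAS AND PROOFS =====

-- 'nums[i] > nums[i+1]' as a predicate on the index (used to describe both loops)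
def pvDescAt (nums : List Int) (i : Int) : Bool :=
  PySem.List.pyGetD nums i 0 > PySem.List.pyGetD nums (i + 1) 0

-- sum of nums[a:b] as a range-map sum
def pvS (nums : List Int) (a b : Int) : Int :=
  ((PySem.List.pyRange a b 1).map (fun i => PySem.List.pyGetD nums i 0)).sum

theorem pvS_cons (nums : List Int) (a b : Int) (h : a < b) :
    pvS nums a b = PySem.List.pyGetD nums a 0 + pvS nums (a + 1) b := by
  simp [pvS, PySem.List.pyRange_one_cons h]

theorem pvS_nil (nums : List Int) (a b : Int) (h : b ≤ a) : pvS nums a b = 0 := by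
  simp [pvS, PySem.List.pyRange_one_eq_nil h]

theorem pvS_single (nums : List Int) (a : Int) :
    pvS nums a (a + 1) = PySem.List.pyGetD nums a 0 := by
  rw [pvS_cons nums a (a + 1) (by omega), pvS_nil nums (a + 1) (a + 1) le_rfl, add_zero]

theorem pvS_split (nums : List Int) (a m b : Int) (h1 : a ≤ m) (h2 : m ≤ b) :
    pvS nums a b = pvS nums a m + pvS nums m b := by
  simp [pvS, PySem.List.pyRange_one_append a m b h1 h2]

theorem pvS_drop (nums : List Int) (a : Int) (h0 : 0 ≤ a) :
    pvS nums a (PySem.List.len nums) = (nums.drop a.toNat).sum := by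
  simp only [pvS, PySem.List.len]
  rw [PySem.List.map_pyGetD_pyRange' nums 0 h0]

-- ---- A's loop characterised ----

theorem pv_foldA_true_aux (nums : List Int) (n : Int) :
    ∀ (k : Nat) (a asc desc : Int), (n - a).toNat = k →
    (PySem.List.pyRange a n 1).foldl (pvStepA nums n) (asc, desc, true)
      = (asc, desc + pvS nums a n, true) := by
  intro k
  induction k with
  | zero =>
    intro a asc desc hk
    have h : n ≤ a := by omega
    rw [PySem.List.pyRange_one_eq_nil h, pvS_nil nums a n h]
    simp
  | succ k ih =>
    intro a asc desc hk
    have ha : a < n := by omega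
    rw [PySem.List.pyRange_one_cons ha]
    simp only [List.foldl_cons]
    have hstep : pvStepA nums n (asc, desc, true) a
        = (asc, desc + PySem.List.pyGetD nums a 0, true) := by
      simp [pvStepA]
    rw [hstep, ih (a + 1) asc (desc + PySem.List.pyGetD nums a 0) (by omega),
        pvS_cons nums a n ha]
    ring_nf

theorem pv_foldA_true (nums : List Int) (n a asc desc : Int) :
    (PySem.List.pyRange a n 1).foldl (pvStepA nums n) (asc, desc, true)
      = (asc, desc + pvS nums a n, true) :=
  pv_foldA_true_aux nums n (n - a).toNat a asc desc rfl

theorem pv_foldA_false_aux (nums : List Int) (n : Int) :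
    ∀ (k : Nat) (a asc desc : Int), (n - a).toNat = k → 0 ≤ a → a < n →
    (PySem.List.pyRange a n 1).foldl (pvStepA nums n) (asc, desc, false)
      = match (PySem.List.pyRange a (n - 1) 1).find? (pvDescAt nums) with
        | some p => (asc + pvS nums a (p + 1), PySem.List.pyGetD nums p 0 + pvS nums (p + 1) n, true)
        | none   => (asc + pvS nums a n, PySem.List.pyGetD nums (n - 1) 0, false) := by
  intro k
  induction k with
  | zero => intro a asc desc hk h0 ha; omega
  | succ k ih =>
    intro a asc desc hk h0 ha
    rw [PySem.List.pyRange_one_cons ha]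
    simp only [List.foldl_cons]
    by_cases hC : a + 1 < n ∧ PySem.List.pyGetD nums a 0 > PySem.List.pyGetD nums (a + 1) 0
    · -- descent at a: peak found
      have hstep : pvStepA nums n (asc, desc, false) a
          = (asc + PySem.List.pyGetD nums a 0, PySem.List.pyGetD nums a 0, true) := by
        simp [pvStepA, hC]
      have hfind : (PySem.List.pyRange a (n - 1) 1).find? (pvDescAt nums) = some a := by
        rw [PySem.List.pyRange_one_cons (by omega : a < n - 1)]
        apply List.find?_cons_of_pos
        simpa [pvDescAt] using hC.2
      rw [hstep, pv_foldA_true nums n (a + 1), hfind]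
      dsimp only
      rw [pvS_single nums a]
    · by_cases hlast : a = n - 1
      · -- last element, no peak ever found
        have hstep : pvStepA nums n (asc, desc, false) a
            = (asc + PySem.List.pyGetD nums a 0, PySem.List.pyGetD nums a 0, false) := by
          simp [pvStepA, hlast]
        have hnil : PySem.List.pyRange (a + 1) n 1 = [] :=
          PySem.List.pyRange_one_eq_nil (by omega)
        have hnil2 : PySem.List.pyRange a (n - 1) 1 = [] :=
          PySem.List.pyRange_one_eq_nil (by omega)
        rw [hstep, hnil, hnil2]
        simp only [List.foldl_nil, List.find?_nil]
        rw [pvS_cons nums a n ha, pvS_nil nums (a + 1) n (by omega), hlast]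
        ring_nf
      · -- no descent at a, keep scanning
        have hmid : a < n - 1 := by omega
        have hna : ¬ PySem.List.pyGetD nums a 0 > PySem.List.pyGetD nums (a + 1) 0 := by
          intro h; exact hC ⟨by omega, h⟩
        have hstep : pvStepA nums n (asc, desc, false) a
            = (asc + PySem.List.pyGetD nums a 0, desc, false) := by
          simp [pvStepA, hna, hlast]
        have hfind : (PySem.List.pyRange a (n - 1) 1).find? (pvDescAt nums)
            = (PySem.List.pyRange (a + 1) (n - 1) 1).find? (pvDescAt nums) := by
          rw [PySem.List.pyRange_one_cons hmid]
          apply List.find?_cons_of_neg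
          simp [pvDescAt, hna]
        rw [hstep, ih (a + 1) (asc + PySem.List.pyGetD nums a 0) desc (by omega) (by omega) (by omega), hfind]
        cases hf : (PySem.List.pyRange (a + 1) (n - 1) 1).find? (pvDescAt nums) with
        | none =>
          dsimp only
          rw [pvS_cons nums a n ha]
          ring_nf
        | some p =>
          have hp : a + 1 ≤ p := by
            have := List.mem_of_find?_eq_some hf
            exact (PySem.List.mem_pyRange_one.mp this).1
          dsimp only
          rw [pvS_cons nums a (p + 1) (by omega)]
          ring_nf

theorem pv_foldA_false (nums : List Int) (n a asc desc : Int)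
    (h0 : 0 ≤ a) (ha : a < n) :
    (PySem.List.pyRange a n 1).foldl (pvStepA nums n) (asc, desc, false)
      = match (PySem.List.pyRange a (n - 1) 1).find? (pvDescAt nums) with
        | some p => (asc + pvS nums a (p + 1), PySem.List.pyGetD nums p 0 + pvS nums (p + 1) n, true)
        | none   => (asc + pvS nums a n, PySem.List.pyGetD nums (n - 1) 0, false) :=
  pv_foldA_false_aux nums n (n - a).toNat a asc desc rfl h0 ha

-- ---- B's loop characterised ----

theorem pvLoopB_char_aux (nums : List Int) :
    ∀ (k : Nat) (a run : Int), ((nums.length : Int) - 1 - a).toNat = k → 0 ≤ a →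
      a ≤ (nums.length : Int) - 1 →
    pvLoopB ((nums.drop a.toNat).zip (nums.drop (a + 1).toNat)) run
      = match (PySem.List.pyRange a ((nums.length : Int) - 1) 1).find? (pvDescAt nums) with
        | some p => (run + pvS nums a (p + 1), some (PySem.List.pyGetD nums p 0))
        | none   => (run + pvS nums a ((nums.length : Int) - 1), none) := by
  intro k
  induction k with
  | zero =>
    intro a run hk h0 ha
    have heq : a = (nums.length : Int) - 1 := by omega
    have hd : nums.drop (a + 1).toNat = [] := by
      apply List.drop_eq_nil_of_le; omega
    rw [hd, List.zip_nil_right]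
    rw [PySem.List.pyRange_one_eq_nil (by omega), List.find?_nil,
        pvS_nil nums a ((nums.length : Int) - 1) (by omega)]
    simp [pvLoopB]
  | succ k ih =>
    intro a run hk h0 ha
    have hmid : a < (nums.length : Int) - 1 := by omega
    have h1 : a.toNat < nums.length := by omega
    have h2 : (a + 1).toNat < nums.length := by omega
    have e1 : nums.drop a.toNat = nums[a.toNat] :: nums.drop (a.toNat + 1) :=
      List.drop_eq_getElem_cons h1
    have e2 : nums.drop (a + 1).toNat = nums[(a + 1).toNat] :: nums.drop ((a + 1).toNat + 1) :=
      List.drop_eq_getElem_cons h2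
    have ea : (a + 1).toNat = a.toNat + 1 := by omega
    have g1 : PySem.List.pyGetD nums a 0 = nums[a.toNat] :=
      PySem.List.pyGetD_eq_getElem nums 0 h0 (by omega)
    have g2 : PySem.List.pyGetD nums (a + 1) 0 = nums[(a + 1).toNat] :=
      PySem.List.pyGetD_eq_getElem nums 0 (by omega) (by omega)
    rw [e1, e2, List.zip_cons_cons]
    rw [PySem.List.pyRange_one_cons hmid]
    by_cases hgt : nums[a.toNat] > nums[(a + 1).toNat]
    · have hfind : List.find? (pvDescAt nums) (a :: PySem.List.pyRange (a + 1) ((nums.length : Int) - 1) 1) = some a := by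
        apply List.find?_cons_of_pos
        simp [pvDescAt, g1, g2]
        exact hgt
      rw [hfind]
      dsimp only
      rw [pvS_single nums a, g1]
      simp [pvLoopB, hgt]
    · have hfind : List.find? (pvDescAt nums) (a :: PySem.List.pyRange (a + 1) ((nums.length : Int) - 1) 1)
          = (PySem.List.pyRange (a + 1) ((nums.length : Int) - 1) 1).find? (pvDescAt nums) := by
        apply List.find?_cons_of_neg
        simp [pvDescAt, g1, g2]
        omega
      rw [hfind]
      simp only [pvLoopB]
      rw [if_neg hgt]
      have ea1 : a.toNat + 1 = (a + 1).toNat := by omega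
      have ea2 : (a + 1).toNat + 1 = (a + 1 + 1).toNat := by omega
      rw [ea1, ea2, ih (a + 1) (run + nums[a.toNat]) (by omega) (by omega) (by omega)]
      cases hf : (PySem.List.pyRange (a + 1) ((nums.length : Int) - 1) 1).find? (pvDescAt nums) with
      | none =>
        dsimp only
        rw [pvS_cons nums a ((nums.length : Int) - 1) hmid, g1]
        ring_nf
      | some p =>
        have hp : a + 1 ≤ p := by
          have := List.mem_of_find?_eq_some hf
          exact (PySem.List.mem_pyRange_one.mp this).1
        dsimp only
        rw [pvS_cons nums a (p + 1) (by omega), g1]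
        ring_nf

theorem pvLoopB_char (nums : List Int) (h : nums ≠ []) :
    pvLoopB (nums.zip (nums.drop 1)) 0
      = match (PySem.List.pyRange 0 ((nums.length : Int) - 1) 1).find? (pvDescAt nums) with
        | some p => (pvS nums 0 (p + 1), some (PySem.List.pyGetD nums p 0))
        | none   => (pvS nums 0 ((nums.length : Int) - 1), none) := by
  have hlen : 0 < nums.length := List.length_pos_of_ne_nil h
  have := pvLoopB_char_aux nums ((nums.length : Int) - 1 - 0).toNat 0 0 rfl le_rfl (by omega)
  simp only [Int.toNat_zero, List.drop_zero, show ((0:Int) + 1).toNat = 1 by omega] at this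
  rw [this]
  cases (PySem.List.pyRange 0 ((nums.length : Int) - 1) 1).find? (pvDescAt nums) <;> simp

-- nums[-1] = nums[n-1]
theorem pv_last_eq (nums : List Int) (h : nums ≠ []) :
    PySem.List.pyGetD nums (-1) 0 = PySem.List.pyGetD nums ((nums.length : Int) - 1) 0 := by
  have hlen : 0 < nums.length := List.length_pos_of_ne_nil h
  rw [PySem.List.pyGetD_neg_one nums 0 h,
      PySem.List.pyGetD_eq_getElem nums 0 (by omega) (by omega),
      List.getLast_eq_getElem]
  congr 1
  omega

-- ===== VERDICT (by name: the statement is the Claim_ definition above) =====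
theorem compareBitonicSums_spec : Claim_equal_compareBitonicSums := by
  unfold Claim_equal_compareBitonicSums Spec_compareBitonicSums
  intro nums _
  simp only [compareBitonicSums, compareBitonicSums_alt]
  by_cases hnil : nums = []
  · subst hnil; simp [PySem.List.len]
  · have hlen : 0 < nums.length := List.length_pos_of_ne_nil hnil
    have hz : PySem.List.len nums ≠ 0 := by simp [PySem.List.len]; omega
    have hlen' : PySem.List.len nums = (nums.length : Int) := by simp [PySem.List.len]
    rw [if_neg hz, if_neg hnil,
        pv_foldA_false nums (PySem.List.len nums) 0 0 0 le_rfl (by omega),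
        PySem.List.slice_from_one, ← List.drop_one, pvLoopB_char nums hnil, hlen']
    have htot : nums.sum = pvS nums 0 (nums.length : Int) := by
      have := pvS_drop nums 0 le_rfl
      simp at this
      simp [this]
    cases hf : (PySem.List.pyRange 0 ((nums.length : Int) - 1) 1).find? (pvDescAt nums) with
    | some p =>
      have hp := PySem.List.mem_pyRange_one.mp (List.mem_of_find?_eq_some hf)
      dsimp only
      have hsplit : pvS nums 0 (nums.length : Int)
          = pvS nums 0 (p + 1) + pvS nums (p + 1) (nums.length : Int) :=
        pvS_split nums 0 (p + 1) (nums.length : Int) (by omega) (by omega)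
      rw [htot]
      simp only [zero_add]
      rw [hsplit]
      split_ifs <;> omega
    | none =>
      dsimp only
      rw [pv_last_eq nums hnil, htot]
      have hsingle : pvS nums ((nums.length : Int) - 1) (nums.length : Int)
          = PySem.List.pyGetD nums ((nums.length : Int) - 1) 0 := by
        have h := pvS_single nums ((nums.length : Int) - 1)
        rwa [show ((nums.length : Int) - 1) + 1 = (nums.length : Int) by omega] at h
      have hsplit : pvS nums 0 (nums.length : Int)
          = pvS nums 0 ((nums.length : Int) - 1) + PySem.List.pyGetD nums ((nums.length : Int) - 1) 0 := by
        rw [pvS_split nums 0 ((nums.length : Int) - 1) (nums.length : Int) (by omega) (by omega), hsingle]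
      simp only [zero_add]
      rw [hsplit]
      split_ifs <;> linarith
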